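-- pv_equiv track=rewrite | github.com/rawan4oud/FYP | preprocessing.py | merge_notes
-- ===== SOURCE A (Python) =====
-- def merge_notes(track):
--     merged_track = []
--
--     for i, note in enumerate(track):
--         if i == 0 or note['start'] - track[i-1]['start'] > 50:
--             merged_track.append(note)
--         else:
--             # Check if the current note has a higher pitch than the previous one
--             if note['pitch'] > merged_track[-1]['pitch']:
--                 merged_track[-1] = note
--
--     return merged_track
-- ===== SOURCE B (Python) =====
-- def merge_notes(track):
--     if not track:
--         return []
--     # Pass 1: cut the track into runs of nearby notes (gap to the immediate
--     # predecessor in the original track <= 50).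
--     groups = [[track[0]]]
--     for prev, note in zip(track, track[1:]):
--         if note['start'] - prev['start'] > 50:
--             groups.append([note])
--         else:
--             groups[-1].append(note)
--     # Pass 2: keep the first highest-pitch note of each run.
--     merged = []
--     for g in groups:
--         best = g[0]
--         for n in g[1:]:
--             if n['pitch'] > best['pitch']:
--                 best = n
--         merged.append(best)
--     return merged
-- ===== Notes on version B (the rewrite author's own statement) =====
-- stated objective: alternative
-- what changed: B first cuts the track into runs of nearby notes and then max-scans each run for its first highest-pitch note, instead of A's single fold that appends/overwrites the last output element in place.
import Mathlib
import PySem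

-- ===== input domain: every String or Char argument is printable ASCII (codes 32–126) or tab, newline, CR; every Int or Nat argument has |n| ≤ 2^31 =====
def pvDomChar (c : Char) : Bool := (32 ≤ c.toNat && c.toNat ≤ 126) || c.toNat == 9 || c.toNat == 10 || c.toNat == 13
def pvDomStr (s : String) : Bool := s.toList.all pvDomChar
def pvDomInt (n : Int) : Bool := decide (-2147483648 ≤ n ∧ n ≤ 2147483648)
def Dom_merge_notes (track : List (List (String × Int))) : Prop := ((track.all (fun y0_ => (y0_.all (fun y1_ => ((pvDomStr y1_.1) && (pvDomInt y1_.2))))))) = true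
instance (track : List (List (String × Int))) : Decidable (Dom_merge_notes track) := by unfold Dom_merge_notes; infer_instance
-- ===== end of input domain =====

-- B cuts the track into runs of nearby notes and then max-scans each run for its first
-- highest-pitch note, instead of A's single fold that appends/overwrites the last
-- output element in place (objective: alternative decomposition, same cost).

-- shared helper: note[k], first-match association-list lookup; the default 0 is only
-- reachable outside Pre_ (Python raises KeyError there)
def getI (note : List (String × Int)) (k : String) : Int :=
  ((note.find? (fun kv => kv.1 == k)).map (·.2)).getD 0

-- ===== PORT A =====
def stepA (track : List (List (String × Int))) (merged : List (List (String × Int)))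
    (p : Int × List (String × Int)) : List (List (String × Int)) :=
  if p.1 = 0 ∨ getI p.2 "start" - getI ((PySem.List.pyGet? track (p.1 - 1)).getD []) "start" > 50 then
    merged ++ [p.2]
  else if getI p.2 "pitch" > getI (PySem.List.pyGetD merged (-1) []) "pitch" then
    PySem.List.pySetD merged (-1) p.2
  else merged

def merge_notes (track : List (List (String × Int))) : List (List (String × Int)) :=
  (PySem.List.enumerate track 0).foldl (stepA track) []

-- ===== PORT B =====
def stepB (gs : List (List (List (String × Int))))
    (p : List (String × Int) × List (String × Int)) : List (List (List (String × Int))) :=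
  if getI p.2 "start" - getI p.1 "start" > 50 then gs ++ [[p.2]]
  else PySem.List.pySetD gs (-1) ((PySem.List.pyGetD gs (-1) []) ++ [p.2])

-- best = g[0]; for n in g[1:]: keep n on strictly higher pitch   (g is never empty)
def repB (g : List (List (String × Int))) : List (String × Int) :=
  match g with
  | [] => []
  | h :: _ =>
    (PySem.List.slice g (some 1) none).foldl
      (fun best n => if getI n "pitch" > getI best "pitch" then n else best) h

def merge_notes_alt (track : List (List (String × Int))) : List (List (String × Int)) :=
  match track with
  | [] => []
  | t0 :: _ =>
    ((track.zip (PySem.List.slice track (some 1) none)).foldl stepB [[t0]]).foldl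
      (fun merged g => merged ++ [repB g]) []

-- ===== PRECONDITION & SPEC =====
-- Pre_ is exactly the natural domain on which the Python programs return (both raise
-- KeyError outside it): every note read for 'start' (all of them, once the track has a
-- second note) carries 'start', and every note adjacent to a neighbour within 50 ticks
-- (i.e. in a run of length ≥ 2, the only notes whose pitch is ever compared) carries 'pitch'.
def Pre_merge_notes (track : List (List (String × Int))) : Prop :=
  (track.length ≤ 1 ∨ ∀ n ∈ track, (n.any (fun kv => kv.1 == "start")) = true) ∧
  (∀ i : Nat, i < track.length →
    ((0 < i ∧ getI track[i]! "start" - getI track[i-1]! "start" ≤ 50) ∨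
     (i + 1 < track.length ∧ getI track[i+1]! "start" - getI track[i]! "start" ≤ 50)) →
    (track[i]!.any (fun kv => kv.1 == "pitch")) = true)
instance (track : List (List (String × Int))) : Decidable (Pre_merge_notes track) := by
  unfold Pre_merge_notes; infer_instance

def pvWitness_merge_notes : (List (List (String × Int))) :=
  [[("start", 0), ("pitch", 60)], [("start", 100), ("pitch", 62)], [("start", 110), ("pitch", 61)]]

def Spec_merge_notes (track : List (List (String × Int))) (out : List (List (String × Int))) : Prop := out = merge_notes_alt track
instance (track : List (List (String × Int))) (out : List (List (String × Int))) : Decidable (Spec_merge_notes track out) := by unfold Spec_merge_notes; infer_instance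

-- ===== CLAIM (what is proved, stated in full; the proofs are below) =====
def Claim_equal_merge_notes : Prop := ∀ (track : List (List (String × Int))), Dom_merge_notes track → Pre_merge_notes track → Spec_merge_notes track (merge_notes track)

-- ===== LEMMAS AND PROOFS =====

-- reference recursion both loops reduce to: walk the remaining notes carrying the
-- previous note, the finished representatives and the current run's representative
def goA (prev : List (String × Int)) (done : List (List (String × Int)))
    (rep : List (String × Int)) : List (List (String × Int)) → List (List (String × Int))
  | [] => done ++ [rep]
  | n :: rest =>
    if getI n "start" - getI prev "start" > 50 then goA n (done ++ [rep]) n rest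
    else goA n done (if getI n "pitch" > getI rep "pitch" then n else rep) rest

-- xs[-1] = v on a nonempty list written as ds ++ [r]
theorem set_last {α : Type} (ds : List α) (r v : α) :
    PySem.List.pySetD (ds ++ [r]) (-1) v = ds ++ [v] := by
  have hset : (ds ++ [r]).set ds.length v = ds ++ [v] := by
    induction ds with
    | nil => rfl
    | cons d t ih => simp [ih]
  have h : PySem.List.pyIdx? (ds.length + 1) (-1) = some ds.length := by
    simp [PySem.List.pyIdx?]
  simp [PySem.List.pySetD, PySem.List.pySet?, h, hset]

theorem repB_singleton (n : List (String × Int)) : repB [n] = n := rfl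

theorem repB_append (cur : List (List (String × Int))) (n : List (String × Int))
    (h : cur ≠ []) :
    repB (cur ++ [n]) = if getI n "pitch" > getI (repB cur) "pitch" then n else repB cur := by
  obtain ⟨hd, t, rfl⟩ := List.exists_cons_of_ne_nil h
  simp [repB, PySem.List.slice_from_one, List.foldl_append]

theorem A_loop (rest : List (List (String × Int))) :
    ∀ (pre : List (List (String × Int))) (prev : List (String × Int))
      (done : List (List (String × Int))) (rep : List (String × Int)),
    (PySem.List.enumerate rest ((pre.length + 1 : Nat) : Int)).foldl
        (stepA (pre ++ prev :: rest)) (done ++ [rep]) = goA prev done rep rest := by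
  induction rest with
  | nil => intro pre prev done rep; simp [PySem.List.enumerate, goA]
  | cons n rest ih =>
    intro pre prev done rep
    rw [PySem.List.enumerate_cons, List.foldl_cons]
    have hidx : ((pre.length + 1 : Nat) : Int) - 1 = (pre.length : Int) := by push_cast; ring
    have hget : PySem.List.pyGet? (pre ++ prev :: n :: rest) ((pre.length : Nat) : Int)
        = some prev := by
      rw [PySem.List.pyGet?_natCast]
      simp
    have htrack : pre ++ prev :: n :: rest = (pre ++ [prev]) ++ n :: rest := by simp
    have hlen : ((pre.length + 1 : Nat) : Int) + 1 = (((pre ++ [prev]).length + 1 : Nat) : Int) := by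
      simp
    by_cases hgap : getI n "start" - getI prev "start" > 50
    · have hstep : stepA (pre ++ prev :: n :: rest) (done ++ [rep]) (((pre.length + 1 : Nat) : Int), n)
          = (done ++ [rep]) ++ [n] := by
        simp only [stepA, hidx, hget, Option.getD_some]
        rw [if_pos (Or.inr hgap)]
      rw [hstep, hlen, htrack, ih (pre ++ [prev]) n (done ++ [rep]) n]
      simp [goA, hgap]
    · have hstep : stepA (pre ++ prev :: n :: rest) (done ++ [rep]) (((pre.length + 1 : Nat) : Int), n)
          = done ++ [if getI n "pitch" > getI rep "pitch" then n else rep] := by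
        simp only [stepA, hidx, hget, Option.getD_some,
          PySem.List.pyGetD_neg_one_append_singleton]
        rw [if_neg (fun hor => hor.elim (fun h0 => absurd h0 (by omega)) hgap)]
        split_ifs with hp
        · exact set_last done rep n
        · rfl
      rw [hstep, hlen, htrack, ih (pre ++ [prev]) n done _]
      simp [goA, hgap]

theorem B_loop (rest : List (List (String × Int))) :
    ∀ (prev : List (String × Int)) (gsdone : List (List (List (String × Int))))
      (cur : List (List (String × Int))), cur ≠ [] →
    (((prev :: rest).zip rest).foldl stepB (gsdone ++ [cur])).map repB
      = goA prev (gsdone.map repB) (repB cur) rest := by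
  induction rest with
  | nil => intro prev gsdone cur _; simp [goA]
  | cons n rest ih =>
    intro prev gsdone cur hcur
    rw [List.zip_cons_cons, List.foldl_cons]
    by_cases hgap : getI n "start" - getI prev "start" > 50
    · have hstep : stepB (gsdone ++ [cur]) (prev, n) = (gsdone ++ [cur]) ++ [[n]] := by
        simp [stepB, hgap]
      rw [hstep, ih n (gsdone ++ [cur]) [n] (by simp)]
      simp [goA, hgap, repB_singleton]
    · have hstep : stepB (gsdone ++ [cur]) (prev, n) = gsdone ++ [cur ++ [n]] := by
        simp only [stepB, if_neg hgap, PySem.List.pyGetD_neg_one_append_singleton]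
        exact set_last gsdone cur (cur ++ [n])
      rw [hstep, ih n gsdone (cur ++ [n]) (by simp)]
      simp [goA, hgap, repB_append cur n hcur]

theorem A_eq (t0 : List (String × Int)) (rest : List (List (String × Int))) :
    merge_notes (t0 :: rest) = goA t0 [] t0 rest := by
  unfold merge_notes
  rw [PySem.List.enumerate_cons, List.foldl_cons]
  have h0 : stepA (t0 :: rest) [] (0, t0) = [] ++ [t0] := by simp [stepA]
  rw [h0]
  have := A_loop rest [] t0 [] t0
  simpa using this

theorem B_eq (t0 : List (String × Int)) (rest : List (List (String × Int))) :
    merge_notes_alt (t0 :: rest) = goA t0 [] t0 rest := by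
  simp only [merge_notes_alt]
  rw [PySem.List.slice_from_one, List.tail_cons,
    PySem.List.foldl_append_singleton_eq_map]
  have := B_loop rest t0 [] [t0] (by simp)
  simpa [repB_singleton] using this

-- ===== VERDICT (by name: the statement is the Claim_ definition above) =====
theorem merge_notes_spec : Claim_equal_merge_notes := by
  intro track _ _
  unfold Spec_merge_notes
  cases track with
  | nil => rfl
  | cons t0 rest => rw [A_eq, B_eq]
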